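-- pv_equiv track=rewrite | github.com/RenoirTan/AdventOfCode2023 | adventofcode2023/d07/__init__.py | stretches_of
-- ===== SOURCE A (Python) =====
-- from collections import Counter
--
-- def stretch_length(it: list[int]) -> int:
--     n = len(it)
--     if n <= 0:
--         return 0
--     for i in range(1, n):
--         if it[i] != it[0]:
--             return i
--     return n
--
-- def stretches_of(it: list[int]) -> Counter:
--     i = 0
--     n = len(it)
--     c = Counter()
--     while i < n:
--         l = stretch_length(it[i:])
--         i += l
--         c[l] += 1
--     return c
-- ===== SOURCE B (Python) =====
-- from collections import Counter
--
-- def stretches_of(it: list[int]) -> Counter: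
--     # single linear pass tracking the current run; no slicing
--     c = Counter()
--     run = 0
--     prev = None
--     for x in it:
--         if run and x == prev:
--             run += 1
--         else:
--             if run:
--                 c[run] += 1
--             run = 1
--             prev = x
--     if run:
--         c[run] += 1
--     return c
-- ===== Notes on version B (the rewrite author's own statement) =====
-- stated objective: faster
-- what changed: replaces the while-loop that re-slices the list and rescans each suffix with stretch_length by one linear pass that tracks the current run's value and length and flushes it into the counter at each run boundary
import Mathlib
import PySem

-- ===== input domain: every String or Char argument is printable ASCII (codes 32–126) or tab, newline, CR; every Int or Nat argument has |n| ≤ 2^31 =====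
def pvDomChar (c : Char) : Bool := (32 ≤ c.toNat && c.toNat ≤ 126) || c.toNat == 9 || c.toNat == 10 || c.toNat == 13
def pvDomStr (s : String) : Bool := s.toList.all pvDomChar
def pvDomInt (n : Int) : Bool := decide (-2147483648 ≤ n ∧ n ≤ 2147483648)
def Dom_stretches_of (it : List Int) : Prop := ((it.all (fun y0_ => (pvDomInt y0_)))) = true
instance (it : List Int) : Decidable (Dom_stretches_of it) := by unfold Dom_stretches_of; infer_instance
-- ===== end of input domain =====

-- B replaces A's quadratic slice-and-rescan while-loop by one linear pass over the list
-- that tracks the current run and flushes its length into the counter at each boundary.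

-- ===== PORT A =====
-- `c[l] += 1` on a Counter (missing key counts as 0)
def pvBump (c : PySem.Dict Int Int) (l : Int) : PySem.Dict Int Int :=
  c.insert l (c.getD l 0 + 1)

-- `for i in range(1, n): if it[i] != it[0]: return i` / `return n`; x0 = it[0], i starts at 1
def stretchLenAux (x0 : Int) : List Int → Int → Int
  | [], i => i
  | y :: ys, i => if y ≠ x0 then i else stretchLenAux x0 ys (i + 1)

def stretch_length (it : List Int) : Int :=
  match it with
  | [] => 0
  | x :: xs => stretchLenAux x xs 1

theorem stretchLenAux_ge (x0 : Int) : ∀ (ys : List Int) (i : Int), i ≤ stretchLenAux x0 ys i := by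
  intro ys
  induction ys with
  | nil => intro i; simp [stretchLenAux]
  | cons y ys ih =>
      intro i
      simp only [stretchLenAux]
      split
      · exact le_refl i
      · exact le_trans (by omega) (ih (i + 1))

-- the `while i < n` loop of A, transcribed on the remaining suffix it[i:]
def stretchesLoop (c : PySem.Dict Int Int) : List Int → PySem.Dict Int Int
  | [] => c
  | x :: xs =>
      let l := stretch_length (x :: xs)
      stretchesLoop (pvBump c l) ((x :: xs).drop l.toNat)
  termination_by suffix => suffix.length
  decreasing_by
    have h1 : (1 : Int) ≤ stretch_length (x :: xs) := by
      simpa [stretch_length] using stretchLenAux_ge x xs 1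
    have h2 : 1 ≤ (stretch_length (x :: xs)).toNat := by omega
    simp only [List.length_drop]
    simp only [List.length_cons]
    omega

def stretches_of (it : List Int) : List (Int × Int) :=
  (stretchesLoop PySem.Dict.empty it).items

-- ===== PORT B =====
-- state: (counter, current run length, current run value); prev = None → Option Int
def altStep (s : PySem.Dict Int Int × Int × Option Int) (x : Int) :
    PySem.Dict Int Int × Int × Option Int :=
  let (c, run, prev) := s
  if run ≠ 0 ∧ some x = prev then (c, run + 1, prev)
  else ((if run ≠ 0 then pvBump c run else c), 1, some x)

-- the trailing `if run: c[run] += 1`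
def altFinish (s : PySem.Dict Int Int × Int × Option Int) : PySem.Dict Int Int :=
  if s.2.1 ≠ 0 then pvBump s.1 s.2.1 else s.1

def stretches_of_alt (it : List Int) : List (Int × Int) :=
  (altFinish (it.foldl altStep (PySem.Dict.empty, 0, none))).items

-- ===== PRECONDITION & SPEC =====
def Spec_stretches_of (it : List Int) (out : List (Int × Int)) : Prop := out = stretches_of_alt it
instance (it : List Int) (out : List (Int × Int)) : Decidable (Spec_stretches_of it out) := by unfold Spec_stretches_of; infer_instance

-- ===== CLAIM (what is proved, stated in full; the proofs are below) =====
def Claim_equal_stretches_of : Prop := ∀ (it : List Int), Dom_stretches_of it → Spec_stretches_of it (stretches_of it)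

-- ===== LEMMAS AND PROOFS =====

theorem stretchLenAux_eq (x0 : Int) : ∀ (ys : List Int) (i : Int),
    stretchLenAux x0 ys i = i + ((ys.takeWhile (· == x0)).length : Int) := by
  intro ys
  induction ys with
  | nil => intro i; simp [stretchLenAux]
  | cons y ys ih =>
      intro i
      by_cases h : y = x0
      · subst h
        simp [stretchLenAux, ih]
        omega
      · simp [stretchLenAux, h]

theorem stretch_length_cons (x : Int) (xs : List Int) :
    stretch_length (x :: xs) = 1 + ((xs.takeWhile (· == x)).length : Int) := by
  simp [stretch_length, stretchLenAux_eq]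

theorem takeWhile_eq_replicate (x : Int) (xs : List Int) :
    xs.takeWhile (· == x) = List.replicate (xs.takeWhile (· == x)).length x := by
  rw [List.eq_replicate_iff]
  refine ⟨rfl, ?_⟩
  intro b hb
  have := List.mem_takeWhile_imp hb
  simpa using this

theorem head_dropWhile_ne (x y : Int) (xs ys : List Int)
    (h : xs.dropWhile (· == x) = y :: ys) : y ≠ x := by
  have := List.head?_dropWhile_not (· == x) xs
  rw [h] at this
  simpa using this

theorem foldl_replicate_extend (x : Int) : ∀ (m : Nat) (c : PySem.Dict Int Int) (r : Int),
    1 ≤ r →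
    List.foldl altStep (c, r, some x) (List.replicate m x) = (c, r + (m : Int), some x) := by
  intro m
  induction m with
  | zero => intro c r hr; simp
  | succ m ih =>
      intro c r hr
      rw [List.replicate_succ, List.foldl_cons]
      have hstep : altStep (c, r, some x) x = (c, r + 1, some x) := by
        simp [altStep]
        omega
      rw [hstep, ih c (r + 1) (by omega)]
      have : r + 1 + (m : Int) = r + ((m + 1 : Nat) : Int) := by push_cast; ring
      rw [this]

theorem main_lemma : ∀ (n : Nat) (suffix : List Int), suffix.length ≤ n →
    ∀ (c : PySem.Dict Int Int),
      stretchesLoop c suffix = altFinish (List.foldl altStep (c, 0, none) suffix) := by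
  intro n
  induction n with
  | zero =>
      intro suffix h c
      have : suffix = [] := List.eq_nil_of_length_eq_zero (by omega)
      subst this
      simp [stretchesLoop, altFinish]
  | succ n ih =>
      intro suffix h c
      match suffix with
      | [] => simp [stretchesLoop, altFinish]
      | x :: xs =>
          set k := (xs.takeWhile (· == x)).length with hk
          have hlen : stretch_length (x :: xs) = 1 + (k : Int) := stretch_length_cons x xs
          have htn : (stretch_length (x :: xs)).toNat = 1 + k := by omega
          have hdecomp : xs = List.replicate k x ++ xs.dropWhile (· == x) := by
            conv_lhs => rw [← List.takeWhile_append_dropWhile (p := (· == x)) (l := xs)]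
            rw [← takeWhile_eq_replicate]
          have hdrop : (x :: xs).drop (stretch_length (x :: xs)).toNat = xs.dropWhile (· == x) := by
            rw [htn, Nat.add_comm, List.drop_succ_cons]
            conv_lhs => rw [hdecomp]
            rw [List.drop_append_of_le_length (by simp)]
            simp
          have hA : stretchesLoop c (x :: xs) =
              stretchesLoop (pvBump c (stretch_length (x :: xs))) (xs.dropWhile (· == x)) := by
            rw [stretchesLoop, hdrop]
          -- B side: first element opens the run, the replicate extends it
          have hfirst : altStep (c, 0, none) x = (c, 1, some x) := by simp [altStep]
          have hB : List.foldl altStep (c, 0, none) (x :: xs) =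
              List.foldl altStep (c, 1 + (k : Int), some x) (xs.dropWhile (· == x)) := by
            rw [List.foldl_cons, hfirst]
            conv_lhs => rw [hdecomp]
            rw [List.foldl_append, foldl_replicate_extend x k c 1 (by omega)]
          rw [hA, hB]
          have hklen : k ≤ xs.length := by
            exact (List.takeWhile_sublist (· == x)).length_le
          match hrest : xs.dropWhile (· == x) with
          | [] =>
              rw [hlen]
              simp only [stretchesLoop, altFinish]
              have : ¬ (1 + (k : Int) = 0) := by omega
              simp [this]
          | y :: ys =>
              have hyx : y ≠ x := head_dropWhile_ne x y xs ys hrest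
              have hstep : altStep (c, 1 + (k : Int), some x) y =
                  (pvBump c (1 + (k : Int)), 1, some y) := by
                simp [altStep, hyx]
                omega
              have hlenrest : (y :: ys).length ≤ n := by
                have hsub := (List.dropWhile_sublist (p := (· == x)) (l := xs)).length_le
                rw [hrest] at hsub
                simp only [List.length_cons] at hsub h ⊢
                omega
              have hih := ih (y :: ys) hlenrest (pvBump c (1 + (k : Int)))
              have hfirst2 : altStep (pvBump c (1 + (k : Int)), 0, none) y =
                  (pvBump c (1 + (k : Int)), 1, some y) := by simp [altStep]
              rw [hlen, List.foldl_cons, hstep, hih, List.foldl_cons, hfirst2]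

-- ===== VERDICT (by name: the statement is the Claim_ definition above) =====
theorem stretches_of_spec : Claim_equal_stretches_of := by
  intro it _
  show stretches_of it = stretches_of_alt it
  unfold stretches_of stretches_of_alt
  rw [main_lemma it.length it le_rfl]
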